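-- pv_equiv track=rewrite | github.com/Dimitrije-Jimmy/AdventOfCode2024 | day12/main2.2.py | get_boundary_edges
-- ===== SOURCE A (Python) =====
-- def get_boundary_edges(region_positions, grid):
--     """Return a set of edges that form the boundary of the region.
--        Represent each edge by a tuple of coordinates ((r1,c1),(r2,c2))
--        where (r1,c1) < (r2,c2) to keep a consistent ordering.
--
--        We'll represent edges in terms of the grid cell corners.
--        For a cell (r,c), the corners are:
--          top-left: (r,c), top-right: (r,c+1)
--          bottom-left: (r+1,c), bottom-right: (r+1,c+1)
--
--        We'll check each cell boundary and if it's on the region boundary, we add that edge.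
--     """
--     region_set = set(region_positions)
--     edges = set()
--     n = len(grid)
--     m = len(grid[0])
--
--     for (r, c) in region_positions:
--         # top edge
--         if r == 0 or (r-1,c) not in region_set:
--             # edge between (r,c) and (r,c+1) in corner coords: ((r,c),(r,c+1))
--             e = ((r,c),(r,c+1))
--             edges.add(normalize_edge(e))
--         # bottom edge
--         if r == n-1 or (r+1,c) not in region_set:
--             e = ((r+1,c),(r+1,c+1))
--             edges.add(normalize_edge(e))
--         # left edge
--         if c == 0 or (r,c-1) not in region_set:
--             e = ((r,c),(r+1,c))
--             edges.add(normalize_edge(e))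
--         # right edge
--         if c == m-1 or (r,c+1) not in region_set:
--             e = ((r,c+1),(r+1,c+1))
--             edges.add(normalize_edge(e))
--
--     return edges
--
-- def normalize_edge(e):
--     """Ensure the edge tuple is always in a consistent order.
--        e is ((r1,c1),(r2,c2)) - let's ensure (r1,c1) < (r2,c2) lex order.
--     """
--     p1, p2 = e
--     if p1 < p2:
--         return (p1,p2)
--     else:
--         return (p2,p1)
-- ===== SOURCE B (Python) =====
-- def get_boundary_edges(region_positions, grid):
--     """Parity version: toggle each cell's four corner-edges; edges shared by two
--        region cells cancel, leaving exactly the boundary edges."""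
--     edges = set()
--     seen = set()
--     for (r, c) in region_positions:
--         if (r, c) in seen:
--             continue
--         seen.add((r, c))
--         for e in (((r, c), (r, c + 1)),
--                   ((r + 1, c), (r + 1, c + 1)),
--                   ((r, c), (r + 1, c)),
--                   ((r, c + 1), (r + 1, c + 1))):
--             if e in edges:
--                 edges.remove(e)
--             else:
--                 edges.add(e)
--     return edges
-- ===== Notes on version B (the rewrite author's own statement) =====
-- stated objective: alternative
-- what changed: B replaces A's four neighbor-membership/grid-border tests per cell with a parity (symmetric-difference) scheme: it toggles each deduplicated cell's four corner-edges in an edge set, so interior edges shared by two region cells cancel and only boundary edges survive, with no border or neighbor tests at all.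
-- intended difference: On inputs where some region cell lies on the grid's border line (row 0, row n-1, column 0 or column m-1) while its neighbor just across that line is also in the region (possible only when positions extend outside the grid), A's short-circuiting border test adds the edge shared by those two region cells to the boundary, while B omits it; an edge between two region cells is interior, so B's value is the intended boundary. — e.g. on get_boundary_edges([(0, 0), (-1, 0)], [["a"]]): A returns [((0, 0), (0, 1)), ((1, 0), (1, 1)), ((0, 0), (1, 0)), ((0, 1), (1, 1)), ((-1, 0), (-1, 1)), ((-1, 0), (0, 0)), ((-1, 1…, B returns [((1, 0), (1, 1)), ((0, 0), (1, 0)), ((0, 1), (1, 1)), ((-1, 0), (-1, 1)), ((-1, 0), (0, 0)), ((-1, 1), (0, 1))]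
import Mathlib
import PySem

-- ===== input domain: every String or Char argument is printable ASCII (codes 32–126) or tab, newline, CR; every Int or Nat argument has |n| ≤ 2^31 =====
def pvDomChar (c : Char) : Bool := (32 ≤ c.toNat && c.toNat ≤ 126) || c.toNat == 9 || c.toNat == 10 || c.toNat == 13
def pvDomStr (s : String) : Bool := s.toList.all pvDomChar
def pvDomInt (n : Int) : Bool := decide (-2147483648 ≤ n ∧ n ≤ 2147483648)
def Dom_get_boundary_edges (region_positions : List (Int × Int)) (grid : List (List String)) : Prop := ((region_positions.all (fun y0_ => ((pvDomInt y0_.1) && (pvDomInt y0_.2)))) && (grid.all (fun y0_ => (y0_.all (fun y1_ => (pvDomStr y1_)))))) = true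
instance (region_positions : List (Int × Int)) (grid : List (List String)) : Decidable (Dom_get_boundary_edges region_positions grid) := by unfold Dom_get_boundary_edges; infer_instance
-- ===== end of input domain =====

-- B replaces A's per-cell neighbor-membership/border tests by a parity (symmetric-difference) scheme
-- that toggles each deduplicated cell's four corner-edges, so shared interior edges cancel (objective: alternative).

-- ===== PORT A =====
-- Python tuple '<' on (Int,Int) pairs is lexicographic
def normalize_edge (e : (Int × Int) × (Int × Int)) : (Int × Int) × (Int × Int) :=
  if e.1.1 < e.2.1 ∨ (e.1.1 = e.2.1 ∧ e.1.2 < e.2.2) then (e.1, e.2) else (e.2, e.1)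

def get_boundary_edges (region_positions : List (Int × Int)) (grid : List (List String)) : List ((Int × Int) × (Int × Int)) :=
  let region_set : PySem.Set (Int × Int) := PySem.Set.ofList region_positions
  let n : Int := grid.length
  -- grid[0] raises IndexError when grid = [] (excluded by Pre_); the .getD [] branch is unreachable there
  let m : Int := (((PySem.List.pyGet? grid 0).getD []).length : Int)
  region_positions.foldl (fun edges p =>
    let r := p.1
    let c := p.2
    let edges := if r = 0 ∨ ¬ (PySem.Set.contains region_set (r - 1, c) = true) then
        PySem.Set.add edges (normalize_edge ((r, c), (r, c + 1))) else edges
    let edges := if r = n - 1 ∨ ¬ (PySem.Set.contains region_set (r + 1, c) = true) then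
        PySem.Set.add edges (normalize_edge ((r + 1, c), (r + 1, c + 1))) else edges
    let edges := if c = 0 ∨ ¬ (PySem.Set.contains region_set (r, c - 1) = true) then
        PySem.Set.add edges (normalize_edge ((r, c), (r + 1, c))) else edges
    let edges := if c = m - 1 ∨ ¬ (PySem.Set.contains region_set (r, c + 1) = true) then
        PySem.Set.add edges (normalize_edge ((r, c + 1), (r + 1, c + 1))) else edges
    edges) PySem.Set.empty

-- ===== PORT B =====
def cell_edges (r c : Int) : List ((Int × Int) × (Int × Int)) :=
  [((r, c), (r, c + 1)),
   ((r + 1, c), (r + 1, c + 1)),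
   ((r, c), (r + 1, c)),
   ((r, c + 1), (r + 1, c + 1))]

def toggle_edge (edges : PySem.Set ((Int × Int) × (Int × Int))) (e : (Int × Int) × (Int × Int)) :
    PySem.Set ((Int × Int) × (Int × Int)) :=
  if PySem.Set.contains edges e = true then PySem.Set.discard edges e else PySem.Set.add edges e

def get_boundary_edges_alt (region_positions : List (Int × Int)) (grid : List (List String)) : List ((Int × Int) × (Int × Int)) :=
  (region_positions.foldl (fun st p =>
      if PySem.Set.contains st.1 p = true then st
      else (PySem.Set.add st.1 p, (cell_edges p.1 p.2).foldl toggle_edge st.2))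
    (PySem.Set.empty, PySem.Set.empty)).2

-- ===== PRECONDITION & SPEC =====
-- Pre_ excludes only grid = [], on which the Python A raises IndexError at len(grid[0]).
def Pre_get_boundary_edges (region_positions : List (Int × Int)) (grid : List (List String)) : Prop :=
  grid ≠ []
instance (region_positions : List (Int × Int)) (grid : List (List String)) : Decidable (Pre_get_boundary_edges region_positions grid) := by unfold Pre_get_boundary_edges; infer_instance
def pvWitness_get_boundary_edges : (List (Int × Int)) × List (List String) := ([(0, 0), (0, 1)], [["a", "b"]])

-- On inputs where some region cell lies on the grid's border line (row 0, row n-1, column 0 or column m-1)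
-- while its neighbor just across that line is also in the region (possible only when positions extend outside
-- the grid), A's short-circuiting border test adds the edge shared by those two region cells to the boundary,
-- while B omits it; an edge between two region cells is interior, so B's value is the intended boundary.
def D_get_boundary_edges (region_positions : List (Int × Int)) (grid : List (List String)) : Prop :=
  ∃ p ∈ region_positions,
    ((p.1 + 1, p.2) ∈ region_positions ∧ (p.1 = -1 ∨ p.1 = (grid.length : Int) - 1)) ∨
    ((p.1, p.2 + 1) ∈ region_positions ∧ (p.2 = -1 ∨ p.2 = ((grid.headD []).length : Int) - 1))
instance (region_positions : List (Int × Int)) (grid : List (List String)) : Decidable (D_get_boundary_edges region_positions grid) := by unfold D_get_boundary_edges; infer_instance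

def Spec_get_boundary_edges (region_positions : List (Int × Int)) (grid : List (List String)) (out : List ((Int × Int) × (Int × Int))) : Prop := ¬ D_get_boundary_edges region_positions grid → out = get_boundary_edges_alt region_positions grid
instance (region_positions : List (Int × Int)) (grid : List (List String)) (out : List ((Int × Int) × (Int × Int))) : Decidable (Spec_get_boundary_edges region_positions grid out) := by unfold Spec_get_boundary_edges; infer_instance

def pvDiffWitness_get_boundary_edges : (List (Int × Int)) × List (List String) := ([(0, 0), (-1, 0)], [["a"]])
def pvDiffWitnessOut_get_boundary_edges : (List ((Int × Int) × (Int × Int))) × (List ((Int × Int) × (Int × Int))) :=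
  ([((0, 0), (0, 1)), ((1, 0), (1, 1)), ((0, 0), (1, 0)), ((0, 1), (1, 1)), ((-1, 0), (-1, 1)), ((-1, 0), (0, 0)), ((-1, 1), (0, 1))],
   [((1, 0), (1, 1)), ((0, 0), (1, 0)), ((0, 1), (1, 1)), ((-1, 0), (-1, 1)), ((-1, 0), (0, 0)), ((-1, 1), (0, 1))])

-- ===== CLAIM (what is proved, stated in full; the proofs are below) =====
def Claim_unchanged_get_boundary_edges : Prop := ∀ (region_positions : List (Int × Int)) (grid : List (List String)), Dom_get_boundary_edges region_positions grid → Pre_get_boundary_edges region_positions grid → Spec_get_boundary_edges region_positions grid (get_boundary_edges region_positions grid)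
def Claim_changed_get_boundary_edges : Prop := Dom_get_boundary_edges (pvDiffWitness_get_boundary_edges.1) (pvDiffWitness_get_boundary_edges.2) ∧ Pre_get_boundary_edges (pvDiffWitness_get_boundary_edges.1) (pvDiffWitness_get_boundary_edges.2) ∧ D_get_boundary_edges (pvDiffWitness_get_boundary_edges.1) (pvDiffWitness_get_boundary_edges.2) ∧ get_boundary_edges (pvDiffWitness_get_boundary_edges.1) (pvDiffWitness_get_boundary_edges.2) = pvDiffWitnessOut_get_boundary_edges.1 ∧ get_boundary_edges_alt (pvDiffWitness_get_boundary_edges.1) (pvDiffWitness_get_boundary_edges.2) = pvDiffWitnessOut_get_boundary_edges.2 ∧ pvDiffWitnessOut_get_boundary_edges.1 ≠ pvDiffWitnessOut_get_boundary_edges.2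
def Claim_exact_get_boundary_edges : Prop := ∀ (region_positions : List (Int × Int)) (grid : List (List String)), Dom_get_boundary_edges region_positions grid → Pre_get_boundary_edges region_positions grid → D_get_boundary_edges region_positions grid → get_boundary_edges region_positions grid ≠ get_boundary_edges_alt region_positions grid
-- ===== LEMMAS AND PROOFS =====

-- each entry pairs a neighbouring cell with the edge separating it from p, in A's/B's top,bottom,left,right order
def nbrs (p : Int × Int) : List ((Int × Int) × ((Int × Int) × (Int × Int))) :=
  [((p.1 - 1, p.2), ((p.1, p.2), (p.1, p.2 + 1))),
   ((p.1 + 1, p.2), ((p.1 + 1, p.2), (p.1 + 1, p.2 + 1))),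
   ((p.1, p.2 - 1), ((p.1, p.2), (p.1 + 1, p.2))),
   ((p.1, p.2 + 1), ((p.1, p.2 + 1), (p.1 + 1, p.2 + 1)))]

-- edges of p whose separated neighbour is outside R
def surv (R : List (Int × Int)) (p : Int × Int) : List ((Int × Int) × (Int × Int)) :=
  ((nbrs p).filter (fun qe => !decide (qe.1 ∈ R))).map (fun qe => qe.2)

def bnd (R P : List (Int × Int)) : List ((Int × Int) × (Int × Int)) := P.flatMap (surv R)

theorem nbrs_ne_self {p a : Int × Int} {e} (h : (a, e) ∈ nbrs p) : a ≠ p := by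
  obtain ⟨pr, pc⟩ := p
  simp only [nbrs, List.mem_cons, List.not_mem_nil, or_false, Prod.mk.injEq] at h
  rcases h with ⟨rfl, -⟩ | ⟨rfl, -⟩ | ⟨rfl, -⟩ | ⟨rfl, -⟩ <;> (intro hc; rw [Prod.ext_iff] at hc; omega)

theorem nbrs_recip {p a : Int × Int} {e} (h : (a, e) ∈ nbrs p) : (p, e) ∈ nbrs a := by
  obtain ⟨pr, pc⟩ := p
  simp only [nbrs, List.mem_cons, List.not_mem_nil, or_false, Prod.mk.injEq] at h ⊢
  rcases h with ⟨rfl, rfl⟩ | ⟨rfl, rfl⟩ | ⟨rfl, rfl⟩ | ⟨rfl, rfl⟩ <;> simp [Prod.ext_iff]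

theorem nbrs_owner {p q a b : Int × Int} {e} (h1 : (a, e) ∈ nbrs p) (h2 : (b, e) ∈ nbrs q)
    (hpq : p ≠ q) : a = q ∧ b = p := by
  obtain ⟨pr, pc⟩ := p
  obtain ⟨qr, qc⟩ := q
  have hpq' : ¬(pr = qr ∧ pc = qc) := by simpa [Prod.ext_iff] using hpq
  simp only [nbrs, List.mem_cons, List.not_mem_nil, or_false, Prod.mk.injEq] at h1 h2
  rcases h1 with ⟨rfl, rfl⟩ | ⟨rfl, rfl⟩ | ⟨rfl, rfl⟩ | ⟨rfl, rfl⟩ <;>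
    rcases h2 with ⟨rfl, he⟩ | ⟨rfl, he⟩ | ⟨rfl, he⟩ | ⟨rfl, he⟩ <;>
    (simp only [Prod.mk.injEq] at he ⊢; omega)

theorem nodup_cell_edges (p : Int × Int) : ((nbrs p).map (fun qe => qe.2)).Nodup := by
  obtain ⟨pr, pc⟩ := p
  simp [nbrs, List.nodup_cons, Prod.ext_iff]

theorem mem_bnd {R P : List (Int × Int)} {e} :
    e ∈ bnd R P ↔ ∃ p ∈ P, ∃ a, (a, e) ∈ nbrs p ∧ a ∉ R := by
  simp only [bnd, surv, List.mem_flatMap, List.mem_map, List.mem_filter]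
  constructor
  · rintro ⟨p, hp, ⟨a, e'⟩, ⟨hmem, hdec⟩, rfl⟩
    exact ⟨p, hp, a, hmem, by simpa using hdec⟩
  · rintro ⟨p, hp, a, hmem, ha⟩
    exact ⟨p, hp, (a, e), ⟨hmem, by simpa using ha⟩, rfl⟩

theorem nodup_surv (R : List (Int × Int)) (p : Int × Int) : (surv R p).Nodup := by
  unfold surv
  exact (nodup_cell_edges p).sublist (List.Sublist.map _ List.filter_sublist)

theorem nodup_bnd {R P : List (Int × Int)} (hPR : ∀ x ∈ P, x ∈ R) (hP : P.Nodup) :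
    (bnd R P).Nodup := by
  induction P with
  | nil => simp [bnd]
  | cons p P ih =>
    rw [bnd, List.flatMap_cons, ← bnd]
    rcases List.nodup_cons.mp hP with ⟨hpP, hP'⟩
    refine List.Nodup.append (nodup_surv R p) (ih (fun x hx => hPR x (List.mem_cons_of_mem _ hx)) hP') ?_
    intro e he1 he2
    rcases List.mem_map.mp he1 with ⟨⟨a, e'⟩, hqe1, rfl⟩
    rcases List.mem_filter.mp hqe1 with ⟨ha1, hd1⟩
    rcases mem_bnd.mp he2 with ⟨p', hp', b, hb, hbR⟩
    have hne : p ≠ p' := fun h => hpP (h ▸ hp')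
    have := nbrs_owner ha1 hb hne
    have haR : a ∉ R := by simpa using hd1
    exact haR (this.1 ▸ hPR p' (List.mem_cons_of_mem _ hp'))


abbrev PvEdge : Type := (Int × Int) × (Int × Int)

-- list/fold utilities
theorem filter_flatMap {α β : Type} (l : List α) (f : α → List β) (pr : β → Bool) :
    (l.flatMap f).filter pr = l.flatMap (fun x => (f x).filter pr) := by
  induction l with
  | nil => simp
  | cons x l ih => simp [List.flatMap_cons, List.filter_append, ih]

theorem flatMap_congr_mem {α β : Type} {l : List α} {f g : α → List β} (h : ∀ x ∈ l, f x = g x) :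
    l.flatMap f = l.flatMap g := by
  induction l with
  | nil => rfl
  | cons x l ih =>
    simp only [List.flatMap_cons, h x (by simp), ih (fun y hy => h y (by simp [hy]))]

-- the toggle loop of B computes a symmetric difference
theorem toggle_fold (E : List PvEdge) : ∀ (es : List PvEdge), es.Nodup → E.Nodup →
    List.foldl toggle_edge es E =
      es.filter (fun x => !decide (x ∈ E)) ++ E.filter (fun e => !decide (e ∈ es)) := by
  induction E with
  | nil => intro es _ _; simp
  | cons e E ih =>
    intro es hes hE
    rcases List.nodup_cons.mp hE with ⟨heE, hE'⟩
    rw [List.foldl_cons]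
    by_cases hm : e ∈ es
    · have ht : toggle_edge es e = es.filter (fun x => !(x == e)) := by
        simp [toggle_edge, hm, PySem.Set.discard]
      rw [ht, ih _ (hes.filter _) hE']
      congr 1
      · rw [List.filter_filter]
        apply List.filter_congr
        intro x hx
        by_cases hx1 : x = e <;> by_cases hx2 : x ∈ E <;> simp [hx1, hx2]
      · have h1 : (e :: E).filter (fun y => !decide (y ∈ es)) = E.filter (fun y => !decide (y ∈ es)) := by
          simp [hm]
        rw [h1]
        apply List.filter_congr
        intro y hy
        have hye : y ≠ e := fun h => heE (h ▸ hy)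
        simp [List.mem_filter, hye]
    · have ht : toggle_edge es e = es ++ [e] := by
        have hnc : ¬ (PySem.Set.contains es e = true) := by simpa [PySem.Set.contains_iff] using hm
        unfold toggle_edge
        rw [if_neg hnc]
        exact PySem.Set.add_of_not_mem hm
      have hnd2 : (es ++ [e]).Nodup := by
        rw [List.nodup_append]
        exact ⟨hes, List.nodup_singleton _, by intro x hx y hy; rw [List.mem_singleton] at hy; subst hy; exact fun hxe => hm (hxe ▸ hx)⟩
      rw [ht, ih _ hnd2 hE']
      have h1 : (es ++ [e]).filter (fun x => !decide (x ∈ E)) =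
          es.filter (fun x => !decide (x ∈ E)) ++ [e] := by
        simp [List.filter_append, heE]
      have h2 : E.filter (fun y => !decide (y ∈ es ++ [e])) = E.filter (fun y => !decide (y ∈ es)) := by
        apply List.filter_congr
        intro y hy
        have hye : y ≠ e := fun h => heE (h ▸ hy)
        simp [List.mem_append, hye]
      have h3 : es.filter (fun x => !decide (x ∈ e :: E)) = es.filter (fun x => !decide (x ∈ E)) := by
        apply List.filter_congr
        intro x hx
        have hxe : x ≠ e := fun h => hm (h ▸ hx)
        simp [List.mem_cons, hxe]
      have h4 : (e :: E).filter (fun y => !decide (y ∈ es)) = e :: E.filter (fun y => !decide (y ∈ es)) := by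
        simp [hm]
      rw [h1, h2, h3, h4, List.append_assoc]
      rfl

-- ===== A-side =====
-- the loop body of A, with its captured locals made explicit
def stepA (R : List (Int × Int)) (n m : Int) (edges : List PvEdge) (p : Int × Int) : List PvEdge :=
  let r := p.1
  let c := p.2
  let edges := if r = 0 ∨ ¬ (PySem.Set.contains (PySem.Set.ofList R) (r - 1, c) = true) then
      PySem.Set.add edges (normalize_edge ((r, c), (r, c + 1))) else edges
  let edges := if r = n - 1 ∨ ¬ (PySem.Set.contains (PySem.Set.ofList R) (r + 1, c) = true) then
      PySem.Set.add edges (normalize_edge ((r + 1, c), (r + 1, c + 1))) else edges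
  let edges := if c = 0 ∨ ¬ (PySem.Set.contains (PySem.Set.ofList R) (r, c - 1) = true) then
      PySem.Set.add edges (normalize_edge ((r, c), (r + 1, c))) else edges
  let edges := if c = m - 1 ∨ ¬ (PySem.Set.contains (PySem.Set.ofList R) (r, c + 1) = true) then
      PySem.Set.add edges (normalize_edge ((r, c + 1), (r + 1, c + 1))) else edges
  edges

def addstep (R : List (Int × Int)) (es : List PvEdge) (qe : (Int × Int) × PvEdge) : List PvEdge :=
  if qe.1 ∉ R then PySem.Set.add es qe.2 else es

theorem normalize_edge_id {e : PvEdge} (h : e.1.1 < e.2.1 ∨ (e.1.1 = e.2.1 ∧ e.1.2 < e.2.2)) :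
    normalize_edge e = e := by
  rw [normalize_edge, if_pos h]

-- no region cell sits on a grid border line with its cross-border neighbour also in the region
def okCell (R : List (Int × Int)) (n m : Int) (p : Int × Int) : Prop :=
  (p.1 = 0 → (p.1 - 1, p.2) ∉ R) ∧ (p.1 = n - 1 → (p.1 + 1, p.2) ∉ R) ∧
  (p.2 = 0 → (p.1, p.2 - 1) ∉ R) ∧ (p.2 = m - 1 → (p.1, p.2 + 1) ∉ R)

theorem stepA_eq {R : List (Int × Int)} {n m : Int} {p : Int × Int} (hok : okCell R n m p)
    (es : List PvEdge) : stepA R n m es p = List.foldl (addstep R) es (nbrs p) := by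
  obtain ⟨pr, pc⟩ := p
  obtain ⟨h1, h2, h3, h4⟩ := hok
  have c1 : (pr = 0 ∨ (pr - 1, pc) ∉ R) ↔ (pr - 1, pc) ∉ R :=
    ⟨fun h => h.elim (fun h0 => h1 h0) id, Or.inr⟩
  have c2 : (pr = n - 1 ∨ (pr + 1, pc) ∉ R) ↔ (pr + 1, pc) ∉ R :=
    ⟨fun h => h.elim (fun h0 => h2 h0) id, Or.inr⟩
  have c3 : (pc = 0 ∨ (pr, pc - 1) ∉ R) ↔ (pr, pc - 1) ∉ R :=
    ⟨fun h => h.elim (fun h0 => h3 h0) id, Or.inr⟩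
  have c4 : (pc = m - 1 ∨ (pr, pc + 1) ∉ R) ↔ (pr, pc + 1) ∉ R :=
    ⟨fun h => h.elim (fun h0 => h4 h0) id, Or.inr⟩
  have n1 : normalize_edge ((pr, pc), (pr, pc + 1)) = ((pr, pc), (pr, pc + 1)) :=
    normalize_edge_id (Or.inr ⟨rfl, by show pc < pc + 1; omega⟩)
  have n2 : normalize_edge ((pr + 1, pc), (pr + 1, pc + 1)) = ((pr + 1, pc), (pr + 1, pc + 1)) :=
    normalize_edge_id (Or.inr ⟨rfl, by show pc < pc + 1; omega⟩)
  have n3 : normalize_edge ((pr, pc), (pr + 1, pc)) = ((pr, pc), (pr + 1, pc)) :=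
    normalize_edge_id (Or.inl (by show pr < pr + 1; omega))
  have n4 : normalize_edge ((pr, pc + 1), (pr + 1, pc + 1)) = ((pr, pc + 1), (pr + 1, pc + 1)) :=
    normalize_edge_id (Or.inl (by show pr < pr + 1; omega))
  simp only [stepA, addstep, nbrs, List.foldl_cons, List.foldl_nil,
    PySem.Set.contains_iff, PySem.Set.mem_ofList, n1, n2, n3, n4, c1, c2, c3, c4]

theorem addfold_absorb {R : List (Int × Int)} : ∀ (L : List ((Int × Int) × PvEdge)) (es : List PvEdge),
    (∀ qe ∈ L, qe.1 ∉ R → qe.2 ∈ es) → List.foldl (addstep R) es L = es := by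
  intro L
  induction L with
  | nil => intro es _; rfl
  | cons qe L ih =>
    intro es h
    rw [List.foldl_cons]
    have hstep : addstep R es qe = es := by
      unfold addstep
      by_cases hc : qe.1 ∈ R
      · rw [if_neg (by simpa using hc)]
      · rw [if_pos hc]
        exact PySem.Set.add_of_mem (h qe (by simp) hc)
    rw [hstep]
    exact ih es (fun qe' h' hc => h qe' (by simp [h']) hc)

theorem addfold_fresh {R : List (Int × Int)} : ∀ (L : List ((Int × Int) × PvEdge)) (es : List PvEdge),
    (L.map (fun qe => qe.2)).Nodup → (∀ qe ∈ L, qe.1 ∉ R → qe.2 ∉ es) →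
    List.foldl (addstep R) es L =
      es ++ (L.filter (fun qe => !decide (qe.1 ∈ R))).map (fun qe => qe.2) := by
  intro L
  induction L with
  | nil => intro es _ _; simp
  | cons qe L ih =>
    intro es hnd h
    rw [List.map_cons] at hnd
    rcases List.nodup_cons.mp hnd with ⟨hqL, hnd'⟩
    rw [List.foldl_cons]
    by_cases hc : qe.1 ∈ R
    · have hstep : addstep R es qe = es := by simp [addstep, hc]
      rw [hstep, ih es hnd' (fun qe' h' hc' => h qe' (by simp [h']) hc')]
      simp [hc]
    · have hstep : addstep R es qe = es ++ [qe.2] := by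
        simp only [addstep, if_pos hc]
        rw [PySem.Set.add_of_not_mem (h qe (by simp) hc)]
      have h' : ∀ qe' ∈ L, qe'.1 ∉ R → qe'.2 ∉ es ++ [qe.2] := by
        intro qe' h1 hc'
        simp only [List.mem_append, List.mem_singleton]
        rintro (hcon | hcon)
        · exact h qe' (by simp [h1]) hc' hcon
        · exact hqL (hcon ▸ List.mem_map.mpr ⟨qe', h1, rfl⟩)
      rw [hstep, ih (es ++ [qe.2]) hnd' h']
      simp [hc, List.append_assoc]

theorem A_fold (R : List (Int × Int)) (n m : Int) (hok : ∀ p ∈ R, okCell R n m p) :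
    ∀ (l P : List (Int × Int)), (∀ x ∈ l, x ∈ R) → (∀ x ∈ P, x ∈ R) → P.Nodup →
    List.foldl (stepA R n m) (bnd R P) l = bnd R (List.foldl PySem.Set.add P l) := by
  intro l
  induction l with
  | nil => intro P _ _ _; rfl
  | cons p l ih =>
    intro P hl hP hnd
    rw [List.foldl_cons, List.foldl_cons]
    have hpR : p ∈ R := hl p (by simp)
    rw [stepA_eq (hok p hpR)]
    by_cases hp : p ∈ P
    · rw [addfold_absorb _ _ (fun qe hqe hc => mem_bnd.mpr ⟨p, hp, qe.1, hqe, hc⟩),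
        PySem.Set.add_of_mem hp]
      exact ih P (fun x hx => hl x (by simp [hx])) hP hnd
    · have hdisj : ∀ qe ∈ nbrs p, qe.1 ∉ R → qe.2 ∉ bnd R P := by
        intro qe hqe hc hcon
        rcases mem_bnd.mp hcon with ⟨p', hp', b, hb, hbR⟩
        have hpq : p ≠ p' := fun h => hp (h ▸ hp')
        have := nbrs_owner hqe hb hpq
        exact hc (this.1 ▸ hP p' hp')
      rw [addfold_fresh _ _ (nodup_cell_edges p) hdisj]
      have hb : bnd R P ++ ((nbrs p).filter (fun qe => !decide (qe.1 ∈ R))).map (fun qe => qe.2) =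
          bnd R (P ++ [p]) := by
        simp [bnd, surv, List.flatMap_append]
      rw [hb, PySem.Set.add_of_not_mem hp]
      exact ih (P ++ [p]) (fun x hx => hl x (by simp [hx]))
        (by intro x hx; rcases List.mem_append.mp hx with h | h
            · exact hP x h
            · simp at h; exact h ▸ hpR)
        (by rw [List.nodup_append]
            exact ⟨hnd, List.nodup_singleton _,
              by intro x hx y hy; rw [List.mem_singleton] at hy; subst hy; exact fun hxe => hp (hxe ▸ hx)⟩)

theorem filter_map_snd (l : List ((Int × Int) × PvEdge)) (pr : PvEdge → Bool) :
    (l.map (fun qe => qe.2)).filter pr = (l.filter (fun qe => pr qe.2)).map (fun qe => qe.2) := by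
  induction l with
  | nil => rfl
  | cons qe l ih => by_cases h : pr qe.2 <;> simp [h, ih]

-- ===== B-side =====
def stepB (st : List (Int × Int) × List PvEdge) (p : Int × Int) :
    List (Int × Int) × List PvEdge :=
  if PySem.Set.contains st.1 p = true then st
  else (PySem.Set.add st.1 p, (cell_edges p.1 p.2).foldl toggle_edge st.2)

theorem B_cell_left (P : List (Int × Int)) (q : Int × Int) (hq : q ∉ P) :
    (bnd P P).filter (fun x => !decide (x ∈ (nbrs q).map (fun qe => qe.2))) = bnd (P ++ [q]) P := by
  unfold bnd
  rw [filter_flatMap]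
  apply flatMap_congr_mem
  intro p hp
  unfold surv
  rw [filter_map_snd, List.filter_filter]
  apply congrArg
  apply List.filter_congr
  intro qe hqe
  obtain ⟨a, e⟩ := qe
  have hpq : p ≠ q := fun h => hq (h ▸ hp)
  by_cases h1 : a = q
  · have he : e ∈ (nbrs q).map (fun qe => qe.2) :=
      List.mem_map.mpr ⟨(p, e), h1 ▸ nbrs_recip hqe, rfl⟩
    simp [he, h1, List.mem_append]
  · have he : e ∉ (nbrs q).map (fun qe => qe.2) := by
      intro hcon
      rcases List.mem_map.mp hcon with ⟨⟨b, e'⟩, hb, hbe⟩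
      cases hbe
      exact h1 (nbrs_owner hqe hb hpq).1
    simp [he, h1, List.mem_append]

theorem B_cell_right (P : List (Int × Int)) (q : Int × Int) (hq : q ∉ P) :
    ((nbrs q).map (fun qe => qe.2)).filter (fun e => !decide (e ∈ bnd P P)) = surv (P ++ [q]) q := by
  unfold surv
  rw [filter_map_snd]
  apply congrArg
  apply List.filter_congr
  intro qe hqe
  obtain ⟨a, e⟩ := qe
  have hne : a ≠ q := nbrs_ne_self hqe
  by_cases hm : a ∈ P
  · have he : e ∈ bnd P P := mem_bnd.mpr ⟨a, hm, q, nbrs_recip hqe, hq⟩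
    simp [he, hm, List.mem_append]
  · have he : e ∉ bnd P P := by
      intro hcon
      rcases mem_bnd.mp hcon with ⟨p', hp', b, hb, hbP⟩
      have hpq : q ≠ p' := fun h => hq (h ▸ hp')
      have := nbrs_owner hqe hb hpq
      exact hm (this.1 ▸ hp')
    simp [he, hm, hne, List.mem_append]

theorem B_cell (P : List (Int × Int)) (q : Int × Int) (hq : q ∉ P) (hP : P.Nodup) :
    List.foldl toggle_edge (bnd P P) ((nbrs q).map (fun qe => qe.2)) = bnd (P ++ [q]) (P ++ [q]) := by
  rw [toggle_fold _ _ (nodup_bnd (fun x hx => hx) hP) (nodup_cell_edges q),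
    B_cell_left P q hq, B_cell_right P q hq]
  simp [bnd, List.flatMap_append]

theorem B_fold : ∀ (l P : List (Int × Int)), P.Nodup →
    List.foldl stepB (P, bnd P P) l =
      (List.foldl PySem.Set.add P l,
        bnd (List.foldl PySem.Set.add P l) (List.foldl PySem.Set.add P l)) := by
  intro l
  induction l with
  | nil => intro P _; rfl
  | cons p l ih =>
    intro P hP
    rw [List.foldl_cons, List.foldl_cons]
    by_cases hp : p ∈ P
    · have h1 : stepB (P, bnd P P) p = (P, bnd P P) := by
        simp [stepB, hp]
      have h2 : PySem.Set.add P p = P := PySem.Set.add_of_mem hp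
      rw [h1, h2]
      exact ih P hP
    · have h1 : stepB (P, bnd P P) p = (P ++ [p], bnd (P ++ [p]) (P ++ [p])) := by
        simp only [stepB]
        rw [if_neg (by simpa [PySem.Set.contains_iff] using hp)]
        rw [PySem.Set.add_of_not_mem hp]
        have hce : cell_edges p.1 p.2 = (nbrs p).map (fun qe => qe.2) := rfl
        rw [hce, B_cell P p hp hP]
      have h2 : PySem.Set.add P p = P ++ [p] := PySem.Set.add_of_not_mem hp
      rw [h1, h2]
      exact ih (P ++ [p]) (by
        rw [List.nodup_append]
        exact ⟨hP, List.nodup_singleton _,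
          by intro x hx y hy; rw [List.mem_singleton] at hy; subst hy; exact fun hxe => hp (hxe ▸ hx)⟩)

-- ===== assembly =====
theorem mlen_eq (grid : List (List String)) :
    ((PySem.List.pyGet? grid 0).getD ([] : List String)) = grid.headD [] := by
  cases grid with
  | nil => simp [PySem.List.pyGet?, PySem.List.pyIdx?]
  | cons g gs => simp

theorem bnd_membership_congr {R R' P : List (Int × Int)} (h : ∀ x, x ∈ R ↔ x ∈ R') :
    bnd R P = bnd R' P := by
  unfold bnd
  apply flatMap_congr_mem
  intro p _
  unfold surv
  apply congrArg
  apply List.filter_congr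
  intro qe _
  rw [decide_eq_decide.mpr (h qe.1)]


-- ===== tightness: inside D_ the flagged shared edge is in A's result but never in B's =====
theorem nbrs_inj {p a b : Int × Int} {e} (h1 : (a, e) ∈ nbrs p) (h2 : (b, e) ∈ nbrs p) : a = b := by
  obtain ⟨pr, pc⟩ := p
  simp only [nbrs, List.mem_cons, List.not_mem_nil, or_false, Prod.mk.injEq] at h1 h2
  rcases h1 with ⟨rfl, rfl⟩ | ⟨rfl, rfl⟩ | ⟨rfl, rfl⟩ | ⟨rfl, rfl⟩ <;>
    rcases h2 with ⟨rfl, he⟩ | ⟨rfl, he⟩ | ⟨rfl, he⟩ | ⟨rfl, he⟩ <;>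
    (first | rfl | (simp only [Prod.mk.injEq] at he ⊢; omega))

theorem B_not_mem {S : List (Int × Int)} {p q : Int × Int} {e : PvEdge}
    (hpe : (q, e) ∈ nbrs p) (hp : p ∈ S) (hq : q ∈ S) : e ∉ bnd S S := by
  intro hcon
  rcases mem_bnd.mp hcon with ⟨p', hp', a, ha, haS⟩
  by_cases hpp : p = p'
  · subst hpp
    exact haS ((nbrs_inj ha hpe) ▸ hq)
  · exact haS ((nbrs_owner hpe ha hpp).2 ▸ hp)

theorem mem_ite_add {es : List PvEdge} {x y : PvEdge} {c : Prop} [Decidable c] (h : x ∈ es) :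
    x ∈ (if c then PySem.Set.add es y else es) := by
  split_ifs
  · exact (PySem.Set.mem_add es y x).mpr (Or.inl h)
  · exact h

theorem stepA_mem_top {R : List (Int × Int)} {n m : Int} {p : Int × Int} (h : p.1 = 0)
    (es : List PvEdge) : ((p.1, p.2), (p.1, p.2 + 1)) ∈ stepA R n m es p := by
  simp only [stepA]
  apply mem_ite_add; apply mem_ite_add; apply mem_ite_add
  have hn : normalize_edge ((p.1, p.2), (p.1, p.2 + 1)) = ((p.1, p.2), (p.1, p.2 + 1)) :=
    normalize_edge_id (Or.inr ⟨rfl, by show p.2 < p.2 + 1; omega⟩)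
  rw [if_pos (Or.inl h), hn]
  exact (PySem.Set.mem_add _ _ _).mpr (Or.inr rfl)

theorem stepA_mem_bottom {R : List (Int × Int)} {n m : Int} {p : Int × Int} (h : p.1 = n - 1)
    (es : List PvEdge) : ((p.1 + 1, p.2), (p.1 + 1, p.2 + 1)) ∈ stepA R n m es p := by
  simp only [stepA]
  apply mem_ite_add; apply mem_ite_add
  have hn : normalize_edge ((p.1 + 1, p.2), (p.1 + 1, p.2 + 1)) = ((p.1 + 1, p.2), (p.1 + 1, p.2 + 1)) :=
    normalize_edge_id (Or.inr ⟨rfl, by show p.2 < p.2 + 1; omega⟩)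
  rw [if_pos (Or.inl h), hn]
  exact (PySem.Set.mem_add _ _ _).mpr (Or.inr rfl)

theorem stepA_mem_left {R : List (Int × Int)} {n m : Int} {p : Int × Int} (h : p.2 = 0)
    (es : List PvEdge) : ((p.1, p.2), (p.1 + 1, p.2)) ∈ stepA R n m es p := by
  simp only [stepA]
  apply mem_ite_add
  have hn : normalize_edge ((p.1, p.2), (p.1 + 1, p.2)) = ((p.1, p.2), (p.1 + 1, p.2)) :=
    normalize_edge_id (Or.inl (by show p.1 < p.1 + 1; omega))
  rw [if_pos (Or.inl h), hn]
  exact (PySem.Set.mem_add _ _ _).mpr (Or.inr rfl)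

theorem stepA_mem_right {R : List (Int × Int)} {n m : Int} {p : Int × Int} (h : p.2 = m - 1)
    (es : List PvEdge) : ((p.1, p.2 + 1), (p.1 + 1, p.2 + 1)) ∈ stepA R n m es p := by
  simp only [stepA]
  have hn : normalize_edge ((p.1, p.2 + 1), (p.1 + 1, p.2 + 1)) = ((p.1, p.2 + 1), (p.1 + 1, p.2 + 1)) :=
    normalize_edge_id (Or.inl (by show p.1 < p.1 + 1; omega))
  rw [if_pos (Or.inl h), hn]
  exact (PySem.Set.mem_add _ _ _).mpr (Or.inr rfl)

theorem stepA_mono {R : List (Int × Int)} {n m : Int} {es : List PvEdge} {p : Int × Int}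
    {x : PvEdge} (h : x ∈ es) : x ∈ stepA R n m es p := by
  simp only [stepA]
  exact mem_ite_add (mem_ite_add (mem_ite_add (mem_ite_add h)))

theorem foldl_stepA_mono {R : List (Int × Int)} {n m : Int} :
    ∀ (l : List (Int × Int)) (es : List PvEdge) (x : PvEdge), x ∈ es →
      x ∈ List.foldl (stepA R n m) es l := by
  intro l
  induction l with
  | nil => intro es x h; exact h
  | cons y l ih => intro es x h; exact ih _ x (stepA_mono h)

theorem foldl_stepA_mem {R : List (Int × Int)} {n m : Int} {c0 : Int × Int} {x : PvEdge}
    (hadd : ∀ es, x ∈ stepA R n m es c0) :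
    ∀ (l : List (Int × Int)) (es : List PvEdge), c0 ∈ l → x ∈ List.foldl (stepA R n m) es l := by
  intro l
  induction l with
  | nil => intro es h; simp at h
  | cons y l ih =>
    intro es hc
    rw [List.foldl_cons]
    rcases List.mem_cons.mp hc with rfl | hc'
    · exact foldl_stepA_mono l _ _ (hadd es)
    · exact ih _ hc'

-- ===== VERDICT (by name: the statement is the Claim_ definition above) =====
theorem get_boundary_edges_spec : Claim_unchanged_get_boundary_edges := by
  intro rps grid _ _ hnd
  show get_boundary_edges rps grid = get_boundary_edges_alt rps grid
  have hA : get_boundary_edges rps grid =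
      List.foldl (stepA rps (grid.length : Int) (((PySem.List.pyGet? grid 0).getD []).length : Int))
        [] rps := rfl
  have hB : get_boundary_edges_alt rps grid = (List.foldl stepB ([], []) rps).2 := rfl
  have hok : ∀ p ∈ rps, okCell rps (grid.length : Int)
      (((PySem.List.pyGet? grid 0).getD []).length : Int) p := by
    intro p hp
    obtain ⟨a, b⟩ := p
    refine ⟨fun h hm => hnd ⟨(a - 1, b), hm, Or.inl ⟨?_, Or.inl (by omega)⟩⟩,
            fun h hm => hnd ⟨(a, b), hp, Or.inl ⟨hm, Or.inr h⟩⟩,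
            fun h hm => hnd ⟨(a, b - 1), hm, Or.inr ⟨?_, Or.inl (by omega)⟩⟩,
            fun h hm => hnd ⟨(a, b), hp, Or.inr ⟨hm, Or.inr (by rw [← mlen_eq grid]; exact h)⟩⟩⟩
    · rw [show a - 1 + 1 = a from by omega]; exact hp
    · rw [show b - 1 + 1 = b from by omega]; exact hp
  have hAf : List.foldl (stepA rps (grid.length : Int)
      (((PySem.List.pyGet? grid 0).getD []).length : Int)) [] rps =
      bnd rps (List.foldl PySem.Set.add [] rps) :=
    A_fold rps _ _ hok rps [] (fun x hx => hx) (by simp) List.nodup_nil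
  have hBf : (List.foldl stepB (([] : List (Int × Int)), ([] : List PvEdge)) rps).2 =
      bnd (List.foldl PySem.Set.add [] rps) (List.foldl PySem.Set.add [] rps) := by
    rw [show (([], []) : List (Int × Int) × List PvEdge) =
        (([] : List (Int × Int)), bnd [] []) from rfl, B_fold rps [] List.nodup_nil]
  rw [hA, hB, hAf, hBf]
  exact bnd_membership_congr (fun x => (PySem.Set.mem_ofList rps x).symm)

theorem get_boundary_edges_changed : Claim_changed_get_boundary_edges := by
  unfold Claim_changed_get_boundary_edges; decide

theorem get_boundary_edges_tight : Claim_exact_get_boundary_edges := by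
  intro rps grid _ _ hd heq
  obtain ⟨p, hp, hcase⟩ := hd
  have hA : get_boundary_edges rps grid =
      List.foldl (stepA rps (grid.length : Int)
        (((PySem.List.pyGet? grid 0).getD []).length : Int)) [] rps := rfl
  have hB : get_boundary_edges_alt rps grid = (List.foldl stepB ([], []) rps).2 := rfl
  have hBf : (List.foldl stepB (([] : List (Int × Int)), ([] : List PvEdge)) rps).2 =
      bnd (List.foldl PySem.Set.add [] rps) (List.foldl PySem.Set.add [] rps) := by
    rw [show (([], []) : List (Int × Int) × List PvEdge) =
        (([] : List (Int × Int)), bnd [] []) from rfl, B_fold rps [] List.nodup_nil]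
  have hmemS : ∀ x : Int × Int, x ∈ List.foldl PySem.Set.add ([] : List (Int × Int)) rps ↔ x ∈ rps :=
    fun x => PySem.Set.mem_ofList rps x
  rcases hcase with ⟨hq, hflag⟩ | ⟨hq, hflag⟩
  · have hpe : ((p.1 + 1, p.2), ((p.1 + 1, p.2), (p.1 + 1, p.2 + 1))) ∈ nbrs p := by simp [nbrs]
    have hBnot : ((p.1 + 1, p.2), (p.1 + 1, p.2 + 1)) ∉ get_boundary_edges_alt rps grid := by
      rw [hB, hBf]
      exact B_not_mem hpe ((hmemS p).mpr hp) ((hmemS _).mpr hq)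
    have hAmem : ((p.1 + 1, p.2), (p.1 + 1, p.2 + 1)) ∈ get_boundary_edges rps grid := by
      rw [hA]
      rcases hflag with h | h
      · exact foldl_stepA_mem
          (fun es => stepA_mem_top (p := (p.1 + 1, p.2)) (by show p.1 + 1 = 0; omega) es) rps [] hq
      · exact foldl_stepA_mem (fun es => stepA_mem_bottom h es) rps [] hp
    exact hBnot (heq ▸ hAmem)
  · have hpe : ((p.1, p.2 + 1), ((p.1, p.2 + 1), (p.1 + 1, p.2 + 1))) ∈ nbrs p := by simp [nbrs]
    have hBnot : ((p.1, p.2 + 1), (p.1 + 1, p.2 + 1)) ∉ get_boundary_edges_alt rps grid := by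
      rw [hB, hBf]
      exact B_not_mem hpe ((hmemS p).mpr hp) ((hmemS _).mpr hq)
    have hAmem : ((p.1, p.2 + 1), (p.1 + 1, p.2 + 1)) ∈ get_boundary_edges rps grid := by
      rw [hA]
      rcases hflag with h | h
      · exact foldl_stepA_mem
          (fun es => stepA_mem_left (p := (p.1, p.2 + 1)) (by show p.2 + 1 = 0; omega) es) rps [] hq
      · exact foldl_stepA_mem
          (fun es => stepA_mem_right (by rw [mlen_eq grid]; exact h) es) rps [] hp
    exact hBnot (heq ▸ hAmem)
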